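-- pv_equiv track=rewrite | github.com/mh-mehdikhani2003/Design_Analysis_Algortihm | question3.py | swingCount
-- ===== SOURCE A (Python) =====
-- def swingCount(s):
--     swing = 0
--     ant = 0
--
--     for i in s:
--         if i == '(':
--             ant -= 1
--         else:
--             ant += 1
--
--             if ant > 0:
--                 swing += ant
--     return swing
-- ===== SOURCE B (Python) =====
-- def swingCount(s):
--     # Divide and conquer: go(seg, base) returns (swing contribution of seg
--     # when the running balance before seg is `base`, balance delta of seg).
--     def go(seg, base):
--         if not seg:
--             return (0, 0)
--         if len(seg) == 1:
--             d = -1 if seg[0] == '(' else 1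
--             b = base + d
--             return (b if d == 1 and b > 0 else 0, d)
--         mid = len(seg) // 2
--         s1, b1 = go(seg[:mid], base)
--         s2, b2 = go(seg[mid:], base + b1)
--         return (s1 + s2, b1 + b2)
--     return go(s, 0)[0]
-- ===== Notes on version B (the rewrite author's own statement) =====
-- stated objective: alternative
-- what changed: Replaces the linear left-to-right accumulator loop with a divide-and-conquer recursion: each half is solved independently given its starting balance, and (swing, balance-delta) results are combined; correct because the contribution of a segment depends only on the balance entering it.
import Mathlib
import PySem

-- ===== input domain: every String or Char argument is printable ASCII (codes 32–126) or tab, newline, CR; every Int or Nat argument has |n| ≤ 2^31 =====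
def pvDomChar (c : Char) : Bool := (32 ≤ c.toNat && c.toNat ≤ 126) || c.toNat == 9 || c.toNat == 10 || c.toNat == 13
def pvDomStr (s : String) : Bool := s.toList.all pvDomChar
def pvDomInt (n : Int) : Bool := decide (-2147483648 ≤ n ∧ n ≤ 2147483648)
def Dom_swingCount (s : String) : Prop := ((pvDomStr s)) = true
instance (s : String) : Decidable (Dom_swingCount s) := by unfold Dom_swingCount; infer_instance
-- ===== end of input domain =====

-- B replaces the one-pass accumulator loop by a divide-and-conquer recursion on halves (alternative decomposition, same cost).
-- ===== PORT A =====
def swingCount (s : String) : Int :=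
  (s.toList.foldl
    (fun (st : Int × Int) i =>
      if i = '(' then (st.1, st.2 - 1)
      else
        let ant := st.2 + 1
        (if ant > 0 then st.1 + ant else st.1, ant))
    (0, 0)).1

-- ===== PORT B =====
-- go(seg, base) of Source B: (swing contribution of seg given entering balance base, balance delta of seg)
def pvGo : List Char → Int → Int × Int
  | [], _ => (0, 0)
  | [c], base =>
      let d : Int := if c = '(' then -1 else 1
      let b := base + d
      (if d = 1 ∧ b > 0 then b else 0, d)
  | c1 :: c2 :: rest, base =>
      let l := c1 :: c2 :: rest
      let mid := l.length / 2
      let p := pvGo (l.take mid) base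
      let q := pvGo (l.drop mid) (base + p.2)
      (p.1 + q.1, p.2 + q.2)
termination_by l => l.length
decreasing_by
  · simp [List.length_take]; omega
  · simp; omega

def swingCount_alt (s : String) : Int := (pvGo s.toList 0).1

-- ===== PRECONDITION & SPEC =====
def Spec_swingCount (s : String) (out : Int) : Prop := out = swingCount_alt s
instance (s : String) (out : Int) : Decidable (Spec_swingCount s out) := by unfold Spec_swingCount; infer_instance

-- ===== CLAIM =====
def Claim_equal_swingCount : Prop := ∀ (s : String), Dom_swingCount s → Spec_swingCount s (swingCount s)

-- ===== LEMMAS AND PROOFS =====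
-- the loop body of port A, named so the induction can rewrite with it
def pvStepA (st : Int × Int) (i : Char) : Int × Int :=
  if i = '(' then (st.1, st.2 - 1)
  else
    let ant := st.2 + 1
    (if ant > 0 then st.1 + ant else st.1, ant)

theorem pv_swingCount_eq (s : String) :
    swingCount s = (s.toList.foldl pvStepA (0, 0)).1 := rfl

-- A's fold from state (swing, base) computes exactly (swing + go.1, base + go.2)
theorem pv_key : ∀ (n : Nat) (l : List Char), l.length = n → ∀ (base swing : Int),
    l.foldl pvStepA (swing, base) = (swing + (pvGo l base).1, base + (pvGo l base).2) := by
  intro n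
  induction n using Nat.strong_induction_on with
  | _ n ih =>
    intro l hl base swing
    match l with
    | [] => simp [pvGo]
    | [c] =>
        by_cases hc : c = '('
        · simp [pvGo, pvStepA, hc, sub_eq_add_neg]
        · by_cases hp : base + 1 > 0 <;> simp [pvGo, pvStepA, hc, hp]
    | c1 :: c2 :: rest =>
        rw [pvGo]
        set L := c1 :: c2 :: rest with hL
        have hlen : 2 ≤ L.length := by simp [hL]
        set mid := L.length / 2 with hmid
        have h1 : (L.take mid).length < n := by
          simp [List.length_take]; omega
        have h2 : (L.drop mid).length < n := by
          simp; omega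
        have hsplit : L = L.take mid ++ L.drop mid := (List.take_append_drop mid L).symm
        conv_lhs => rw [hsplit]
        rw [List.foldl_append]
        rw [ih _ h1 (L.take mid) rfl base swing]
        rw [ih _ h2 (L.drop mid) rfl (base + (pvGo (L.take mid) base).2)
              (swing + (pvGo (L.take mid) base).1)]
        simp [add_assoc]

-- ===== VERDICT =====
theorem swingCount_spec : Claim_equal_swingCount := by
  intro s _
  unfold Spec_swingCount swingCount_alt
  rw [pv_swingCount_eq, pv_key s.toList.length s.toList rfl 0 0]
  simp
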